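-- pv_equiv track=rewrite | github.com/harigro/passrand | units/kombinasi.py | kombinasi_kamus
-- ===== SOURCE A (Python) =====
-- import itertools
-- from typing import Dict, List
--
-- def kombinasi_kamus(kategori: Dict[str, str]) -> Dict[str, str]:
--     """
--     Deskripsi:
--         - Membentuk kamus baru yang berisi kombinasi yang mungkin berdasarkan panjang data kamus
--     """
--     combinations = itertools.chain.from_iterable(
--         itertools.combinations(kategori.keys(), r)
--         for r in range(1, len(kategori) + 1))
--     data_kamus = {}
--     for combination in combinations:
--         combined_string = ''.join(kategori[key] for key in combination)
--         key_name = '_'.join(combination)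
--         data_kamus[key_name] = combined_string
--     return data_kamus
-- ===== SOURCE B (Python) =====
-- def _picks(xs):
--     """All (element, suffix-after-it) pairs of xs, in order."""
--     if not xs:
--         return []
--     return [(xs[0], xs[1:])] + _picks(xs[1:])
--
--
-- def kombinasi_kamus(kategori):
--     """
--     BFS over combination sizes: each frontier entry carries the joined key
--     name, the concatenated value and the suffix of items still available,
--     so every subset is built by extending a smaller one (no itertools).
--     """
--     items = list(kategori.items())
--     data = {}
--     layer = [(k, v, rest) for (k, v), rest in _picks(items)]
--     while layer:
--         nxt = []
--         for name, s, rest in layer: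
--             data[name] = s
--             for (k, v), rest2 in _picks(rest):
--                 nxt.append((name + '_' + k, s + v, rest2))
--         layer = nxt
--     return data
-- ===== Notes on version B (the rewrite author's own statement) =====
-- stated objective: alternative
-- what changed: Replaces the per-size itertools.combinations enumeration (which re-joins every subset's keys and re-looks-up every value) with a single BFS over a frontier of (joined-name, concatenated-value, remaining-suffix) triples that extends each smaller subset in place.
import Mathlib
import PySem

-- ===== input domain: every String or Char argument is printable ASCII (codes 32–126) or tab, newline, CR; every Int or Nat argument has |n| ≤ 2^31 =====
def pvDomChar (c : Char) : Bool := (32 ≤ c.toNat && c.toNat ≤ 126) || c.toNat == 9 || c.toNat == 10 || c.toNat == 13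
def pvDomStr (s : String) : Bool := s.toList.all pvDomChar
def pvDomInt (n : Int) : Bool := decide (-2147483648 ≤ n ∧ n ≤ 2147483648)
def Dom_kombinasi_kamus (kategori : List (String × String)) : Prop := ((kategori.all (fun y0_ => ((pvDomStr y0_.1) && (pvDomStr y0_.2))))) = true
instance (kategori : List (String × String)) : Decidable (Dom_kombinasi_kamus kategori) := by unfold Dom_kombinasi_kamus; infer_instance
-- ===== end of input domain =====

-- One line: B builds the powerset by a BFS frontier of (name, value, remaining suffix) triples
-- extending each smaller subset, instead of A's per-size itertools.combinations with re-join/re-lookup.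

-- ===== PORT A =====
-- itertools.combinations(keys, r): hand port (PySem has no combinations); this structural recursion
-- emits exactly the documented output: all r-subsets in lexicographic order of positions.
def pvCombs {α : Type} : Nat → List α → List (List α)
  | 0, _ => [[]]
  | _+1, [] => []
  | r+1, x :: xs => ((pvCombs r xs).map (fun c => x :: c)) ++ pvCombs (r+1) xs

-- Python A receives a dict; per the type convention the parameter is its association list,
-- read through PySem.Dict. kategori[key] is getD with "" (the key is always present, so exact).
def kombinasi_kamus (kategori : List (String × String)) : List (String × String) :=
  let d := PySem.Dict.ofList kategori
  let keys := PySem.Dict.keys d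
  let combos := (PySem.List.pyRange 1 ((keys.length : Int) + 1)).flatMap
      (fun r => pvCombs r.toNat keys)
  let data := combos.foldl
      (fun acc c =>
        acc.insert (PySem.Str.join "_" c)
          (PySem.Str.join "" (c.map (fun k => PySem.Dict.getD d k ""))))
      (PySem.Dict.empty)
  data.items

-- ===== PORT B =====
-- _picks(xs): all (element, suffix-after-it) pairs, in order.
def pvPicks {α : Type} : List α → List (α × List α)
  | [] => []
  | y :: ys => (y, ys) :: pvPicks ys

-- the inner 'for (k, v), rest2 in _picks(rest)' body of B
def pvStepB (t : String × String × List (String × String)) :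
    List (String × String × List (String × String)) :=
  (pvPicks t.2.2).map (fun q => (t.1 ++ "_" ++ q.1.1, t.2.1 ++ q.1.2, q.2))

-- the while loop; fuel = number of items suffices because the frontier of size-(r) subsets is
-- empty once r exceeds the number of items (proved below: pvF_empty_mono).
def pvLoopB : Nat → List (String × String × List (String × String)) →
    PySem.Dict String String → PySem.Dict String String
  | 0, _, data => data
  | f+1, layer, data =>
    if layer.isEmpty then data
    else
      let st := layer.foldl
        (fun (p : PySem.Dict String String × List (String × String × List (String × String))) t =>
          (p.1.insert t.1 t.2.1, p.2 ++ pvStepB t)) (data, [])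
      pvLoopB f st.2 st.1

def kombinasi_kamus_alt (kategori : List (String × String)) : List (String × String) :=
  let items := (PySem.Dict.ofList kategori).items
  let layer := (pvPicks items).map (fun p => (p.1.1, p.1.2, p.2))
  (pvLoopB items.length layer PySem.Dict.empty).items

-- ===== PRECONDITION & SPEC =====
def Spec_kombinasi_kamus (kategori : List (String × String)) (out : List (String × String)) : Prop := out = kombinasi_kamus_alt kategori
instance (kategori : List (String × String)) (out : List (String × String)) : Decidable (Spec_kombinasi_kamus kategori out) := by unfold Spec_kombinasi_kamus; infer_instance

-- ===== CLAIM (what is proved, stated in full; the proofs are below) =====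
def Claim_equal_kombinasi_kamus : Prop := ∀ (kategori : List (String × String)), Dom_kombinasi_kamus kategori → Spec_kombinasi_kamus kategori (kombinasi_kamus kategori)

-- ===== LEMMAS AND PROOFS =====

-- proof-side abstraction: frontier of (subset, remaining-suffix) pairs of size r
def pvF {α : Type} : Nat → List α → List (List α × List α)
  | 0, xs => [([], xs)]
  | r+1, xs => (pvF r xs).flatMap
      (fun p => (pvPicks p.2).map (fun q => (p.1 ++ [q.1], q.2)))

theorem pvF_cons {α : Type} (r : Nat) (x : α) (xs : List α) :
    pvF (r+1) (x :: xs) =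
      ((pvF r xs).map (fun p => (x :: p.1, p.2))) ++ pvF (r+1) xs := by
  induction r generalizing x xs with
  | zero => simp [pvF, pvPicks]
  | succ r ih =>
    show (pvF (r+1) (x::xs)).flatMap _ = _
    rw [ih]
    simp [pvF, List.flatMap_append, List.map_flatMap, List.flatMap_map, List.map_map, Function.comp_def]

theorem pvF_fst {α : Type} (r : Nat) (xs : List α) :
    (pvF r xs).map (·.1) = pvCombs r xs := by
  induction xs generalizing r with
  | nil =>
    cases r with
    | zero => simp [pvF, pvCombs]
    | succ r =>
      have h : ∀ s, pvF (s+1) ([] : List α) = [] := by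
        intro s
        induction s with
        | zero => simp [pvF, pvPicks]
        | succ s ih => rw [pvF, ih]; rfl
      rw [h]; simp [pvCombs]
  | cons x xs ih =>
    cases r with
    | zero => simp [pvF, pvCombs]
    | succ r =>
      rw [pvF_cons, pvCombs]
      simp [List.map_map, Function.comp, ← ih]

theorem pvPicks_mem {α : Type} (xs : List α) :
    ∀ q ∈ pvPicks xs, q.1 ∈ xs ∧ ∀ a ∈ q.2, a ∈ xs := by
  induction xs with
  | nil => simp [pvPicks]
  | cons x xs ih =>
    intro q hq
    rw [pvPicks] at hq
    rcases List.mem_cons.1 hq with h | h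
    · subst h; exact ⟨by simp, fun a ha => by simp [ha]⟩
    · obtain ⟨h1, h2⟩ := ih q h
      exact ⟨by simp [h1], fun a ha => by simp [h2 a ha]⟩

theorem pvF_len {α : Type} (r : Nat) (xs : List α) :
    ∀ p ∈ pvF r xs, (p.1).length = r := by
  induction r with
  | zero => simp [pvF]
  | succ r ih =>
    intro p hp
    rw [pvF, List.mem_flatMap] at hp
    obtain ⟨a, ha, hp⟩ := hp
    rw [List.mem_map] at hp
    obtain ⟨q, hq, rfl⟩ := hp
    simp [ih a ha]

theorem pvF_mem {α : Type} (r : Nat) (xs : List α) :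
    ∀ p ∈ pvF r xs, (∀ a ∈ p.1, a ∈ xs) ∧ (∀ a ∈ p.2, a ∈ xs) := by
  induction r with
  | zero =>
    intro p hp
    simp [pvF] at hp
    subst hp; simp
  | succ r ih =>
    intro p hp
    rw [pvF, List.mem_flatMap] at hp
    obtain ⟨a, ha, hp⟩ := hp
    rw [List.mem_map] at hp
    obtain ⟨q, hq, rfl⟩ := hp
    obtain ⟨h1, h2⟩ := ih a ha
    obtain ⟨h3, h4⟩ := pvPicks_mem a.2 q hq
    constructor
    · intro b hb
      rcases List.mem_append.1 hb with h | h
      · exact h1 b h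
      · simp at h; subst h; exact h2 _ h3
    · exact fun b hb => h2 b (h4 b hb)

theorem pvCombs_big {α : Type} (r : Nat) (xs : List α) (h : xs.length < r) :
    pvCombs r xs = [] := by
  induction xs generalizing r with
  | nil => cases r with
    | zero => simp at h
    | succ r => rfl
  | cons x xs ih =>
    cases r with
    | zero => simp at h
    | succ r =>
      rw [pvCombs]
      simp at h
      rw [ih r (by omega), ih (r+1) (by omega)]
      simp

theorem pvF_empty_mono {α : Type} (xs : List α) {r i : Nat} (hr : pvF r xs = [])
    (hi : r ≤ i) : pvF i xs = [] := by
  induction i, hi using Nat.le_induction with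
  | base => exact hr
  | succ i hi ih => rw [pvF, ih]; rfl

theorem pvCombs_map {α β : Type} (f : α → β) (r : Nat) (xs : List α) :
    pvCombs r (xs.map f) = (pvCombs r xs).map (List.map f) := by
  induction xs generalizing r with
  | nil => cases r <;> simp [pvCombs]
  | cons x xs ih =>
    cases r with
    | zero => simp [pvCombs]
    | succ r => simp [pvCombs, ih, List.map_map, Function.comp_def]

theorem pvJoin_append (sep : String) (l : List String) (k : String) (h : l ≠ []) :
    PySem.Str.join sep (l ++ [k]) = PySem.Str.join sep l ++ sep ++ k := by
  apply String.toList_inj.mp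
  simp only [PySem.Str.toList_join, String.toList_append, List.map_append, List.map_cons,
    List.map_nil]
  obtain ⟨x, l, rfl⟩ := List.exists_cons_of_ne_nil h
  clear h
  induction l generalizing x with
  | nil => simp [PySem.Chars.join_cons_cons, PySem.Chars.join_singleton]
  | cons y l ih =>
    simp only [List.map_cons, List.cons_append] at ih ⊢
    rw [PySem.Chars.join_cons_cons, ih y, PySem.Chars.join_cons_cons]
    simp

theorem pvJoin_singleton (sep k : String) : PySem.Str.join sep [k] = k := by
  apply String.toList_inj.mp
  simp [PySem.Str.toList_join, PySem.Chars.join_singleton]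

-- the (name, value) pair a subset contributes, in A's formulation
def pvEntry (c : List (String × String)) : String × String :=
  (PySem.Str.join "_" (c.map (·.1)), PySem.Str.join "" (c.map (·.2)))

-- B's frontier at stage r, expressed through pvF
def pvLayer (r : Nat) (items : List (String × String)) :
    List (String × String × List (String × String)) :=
  (pvF r items).map (fun p => ((pvEntry p.1).1, (pvEntry p.1).2, p.2))

theorem pvLayer_step (r : Nat) (hr : 1 ≤ r) (items : List (String × String)) :
    (pvLayer r items).flatMap pvStepB = pvLayer (r + 1) items := by
  unfold pvLayer
  rw [List.flatMap_map]
  show _ = ((pvF r items).flatMap _).map _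
  rw [List.map_flatMap]
  rw [List.flatMap_def, List.flatMap_def]
  congr 1
  apply List.map_congr_left
  intro p hp
  have hne : p.1.map (·.1) ≠ [] := by
    have := pvF_len r items p hp
    intro hc
    have : p.1 = [] := by simpa using congrArg List.length hc
    simp [this] at *; omega
  unfold pvStepB pvEntry
  simp only [List.map_map]
  apply List.map_congr_left
  intro q hq
  simp only [Function.comp]
  refine Prod.ext ?_ (Prod.ext ?_ rfl)
  · simp [List.map_append, pvJoin_append _ _ _ hne]
  · have hne2 : p.1.map (·.2) ≠ [] := by
      intro hc; exact hne (by simpa using congrArg List.length hc)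
    simp [List.map_append, pvJoin_append _ _ _ hne2]

-- the (name, value) pairs the while loop inserts, stage by stage
def pvPairs : Nat → List (String × String × List (String × String)) → List (String × String)
  | 0, _ => []
  | f+1, layer =>
    if layer.isEmpty then []
    else layer.map (fun t => (t.1, t.2.1)) ++ pvPairs f (layer.flatMap pvStepB)

theorem pvLoopB_foldl (f : Nat)
    (layer : List (String × String × List (String × String)))
    (data : PySem.Dict String String) :
    pvLoopB f layer data =
      (pvPairs f layer).foldl (fun acc q => acc.insert q.1 q.2) data := by
  induction f generalizing layer data with
  | zero => rfl
  | succ f ih =>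
    rw [pvLoopB, pvPairs]
    by_cases h : layer.isEmpty
    · simp [h]
    · simp only [h, Bool.false_eq_true, if_false]
      have hsplit : ∀ (l : List (String × String × List (String × String)))
          (a : PySem.Dict String String) (b : List (String × String × List (String × String))),
          l.foldl (fun p t => (p.1.insert t.1 t.2.1, p.2 ++ pvStepB t)) (a, b) =
            (l.foldl (fun a t => a.insert t.1 t.2.1) a, l.foldl (fun b t => b ++ pvStepB t) b) := by
        intro l
        induction l with
        | nil => intro a b; rfl
        | cons x l ihl => intro a b; exact ihl _ _
      rw [hsplit, PySem.List.foldl_append_eq_flatMap, ih]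
      rw [List.nil_append, List.foldl_append, List.foldl_map]

theorem pvF_ne_nil_le (items : List (String × String)) {r : Nat}
    (h : pvF r items ≠ []) : r ≤ items.length := by
  by_contra hc
  apply h
  have h1 : pvCombs r items = [] := pvCombs_big r items (by omega)
  have h2 := pvF_fst r items
  rw [h1] at h2
  exact List.map_eq_nil_iff.mp h2

theorem pvPairs_stages (items : List (String × String)) (f r : Nat) (hr : 1 ≤ r)
    (hf : items.length + 1 ≤ r + f) :
    pvPairs f (pvLayer r items) =
      (List.range' r (items.length + 1 - r)).flatMap
        (fun i => (pvF i items).map (fun p => pvEntry p.1)) := by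
  induction f generalizing r with
  | zero =>
    have : items.length + 1 - r = 0 := by omega
    rw [this]
    rfl
  | succ f ih =>
    by_cases hE : pvF r items = []
    · have hlay : pvLayer r items = [] := by simp [pvLayer, hE]
      rw [pvPairs, hlay]
      simp only [List.isEmpty_nil, if_true]
      symm
      rw [List.flatMap_eq_nil_iff]
      intro i hi
      rw [List.mem_range'] at hi
      obtain ⟨j, _, rfl⟩ := hi
      rw [pvF_empty_mono items hE (by omega)]
      rfl
    · have hle : r ≤ items.length := pvF_ne_nil_le items hE
      have hlay : (pvLayer r items).isEmpty = false := by
        simp [pvLayer, List.isEmpty_eq_false_iff, hE]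
      rw [pvPairs, hlay]
      simp only [Bool.false_eq_true, if_false]
      rw [pvLayer_step r hr items, ih (r + 1) (by omega) (by omega)]
      have hn : items.length + 1 - r = (items.length - r) + 1 := by omega
      rw [hn, List.range'_succ]
      have hn2 : items.length + 1 - (r + 1) = items.length - r := by omega
      rw [List.flatMap_cons, hn2]
      congr 1
      unfold pvLayer
      rw [List.map_map]
      rfl

theorem pvPyRange_one (n : Nat) :
    PySem.List.pyRange 1 ((n : Int) + 1) = List.map (fun i : Nat => (i : Int)) (List.range' 1 n) := by
  induction n with
  | zero => decide
  | succ n ih =>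
    rw [PySem.List.pyRange_one_succ_right (by push_cast; omega),
      show (((n+1):Nat):Int) = (n:Int)+1 by push_cast; ring, ih, List.range'_concat]
    simp [Nat.add_comm]

theorem kombinasi_kamus_eq (kategori : List (String × String)) :
    kombinasi_kamus kategori = kombinasi_kamus_alt kategori := by
  unfold kombinasi_kamus kombinasi_kamus_alt
  simp only []
  apply congrArg PySem.Dict.items
  set d := PySem.Dict.ofList kategori with hd
  have hkeys : PySem.Dict.keys d = d.items.map (·.1) := rfl
  have hlen : (PySem.Dict.keys d).length = d.items.length := by
    rw [hkeys, List.length_map]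
  rw [pvLoopB_foldl]
  have hlay : (pvPicks d.items).map (fun p => (p.1.1, p.1.2, p.2)) = pvLayer 1 d.items := by
    unfold pvLayer
    rw [show pvF 1 d.items = (pvPicks d.items).map (fun q => ([q.1], q.2)) from by
      simp [pvF], List.map_map]
    apply List.map_congr_left
    intro q hq
    simp [pvEntry, pvJoin_singleton]
  rw [hlay, pvPairs_stages d.items d.items.length 1 (le_refl 1) (by omega),
    show d.items.length + 1 - 1 = d.items.length from by omega]
  have hfold : ∀ (cs : List (List String)) (acc : PySem.Dict String String),
      cs.foldl (fun acc c => acc.insert (PySem.Str.join "_" c)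
          (PySem.Str.join "" (c.map (fun k => PySem.Dict.getD d k "")))) acc =
        (cs.map (fun c => (PySem.Str.join "_" c,
          PySem.Str.join "" (c.map (fun k => PySem.Dict.getD d k ""))))).foldl
          (fun acc q => acc.insert q.1 q.2) acc := by
    intro cs
    induction cs with
    | nil => intro acc; rfl
    | cons c cs ihc => intro acc; exact ihc _
  rw [hfold]
  congr 1
  rw [pvPyRange_one, List.flatMap_map, List.map_flatMap, hlen]
  rw [List.flatMap_def, List.flatMap_def]
  congr 1
  apply List.map_congr_left
  intro i hi
  rw [Int.toNat_natCast, hkeys, pvCombs_map, ← pvF_fst, List.map_map, List.map_map]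
  apply List.map_congr_left
  intro p hp
  have hmem := (pvF_mem i d.items p hp).1
  simp only [Function.comp, pvEntry, List.map_map]
  have hv : List.map ((fun k => PySem.Dict.getD d k "") ∘ fun x : String × String => x.1) p.1 =
      List.map (fun x : String × String => x.2) p.1 := by
    apply List.map_congr_left
    intro a ha
    simpa using PySem.Dict.getD_of_mem_items d
      (show (a.1, a.2) ∈ d.items by simpa using hmem a ha)
      (PySem.Dict.nodup_keys_ofList kategori) ""
  rw [hv]

-- ===== VERDICT (by name: the statement is the Claim_ definition above) =====
theorem kombinasi_kamus_spec : Claim_equal_kombinasi_kamus := by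
  intro kategori _
  unfold Spec_kombinasi_kamus
  exact kombinasi_kamus_eq kategori
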